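-- pv_equiv track=rewrite | github.com/feren-OS/solstice | usr/lib/python3/dist-packages/solstice/firefox.py | setExtFeatures
-- ===== SOURCE A (Python) =====
-- def setExtFeatures(confs, nohistory, workspaces):
--     valuestoadd = {"privacy.clearOnShutdown.history": "false", "browser.startup.page": "1", "floorp.browser.workspaces.enabled": "false"}
--     if nohistory == True:
--         valuestoadd["privacy.clearOnShutdown.history"] = "true"
--     if workspaces == True:
--         valuestoadd["browser.startup.page"] = "3"
--         valuestoadd["floorp.browser.workspaces.enabled"] = "true"
--
--     # Check for and update existing values in user.js
--     for i, line in enumerate(confs):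
--         for ii in valuestoadd:
--             if line.startswith('user_pref("' + ii + '", '):
--                 confs[i] = 'user_pref("' + ii + '", ' + valuestoadd[ii] + ");"
--                 valuestoadd.pop(ii) # Ensure this value isn't duplicated later
--                 break # Exit loop to prevent throwing ListChanged
--
--     # Add missing values to user.js, if any
--     for i in valuestoadd:
--         confs.append('user_pref("' + i + '", ' + valuestoadd[i] + ");")
--
--     return confs
-- ===== SOURCE B (Python) =====
-- def setExtFeatures(confs, nohistory, workspaces):
--     valuestoadd = {"privacy.clearOnShutdown.history": "false", "browser.startup.page": "1", "floorp.browser.workspaces.enabled": "false"}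
--     if nohistory == True:
--         valuestoadd["privacy.clearOnShutdown.history"] = "true"
--     if workspaces == True:
--         valuestoadd["browser.startup.page"] = "3"
--         valuestoadd["floorp.browser.workspaces.enabled"] = "true"
--
--     # Pass 1: record the index of the first line matching each pref key
--     found = {}
--     for i, line in enumerate(confs):
--         for key in valuestoadd:
--             if key not in found and line.startswith('user_pref("' + key + '", '):
--                 found[key] = i
--                 break
--
--     # Pass 2: overwrite matched lines in place, append the missing prefs
--     for key, value in valuestoadd.items():
--         newline = 'user_pref("' + key + '", ' + value + ");"
--         if key in found:
--             confs[found[key]] = newline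
--         else:
--             confs.append(newline)
--     return confs
-- ===== Notes on version B (the rewrite author's own statement) =====
-- stated objective: alternative
-- what changed: A interleaves matching and mutation in one nested loop that pops keys from the dict as it rewrites lines; B first builds an index table mapping each pref key to its first matching line in a read-only scan, then in a second pass over the prefs overwrites the indexed lines and appends the missing ones.
import Mathlib
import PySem

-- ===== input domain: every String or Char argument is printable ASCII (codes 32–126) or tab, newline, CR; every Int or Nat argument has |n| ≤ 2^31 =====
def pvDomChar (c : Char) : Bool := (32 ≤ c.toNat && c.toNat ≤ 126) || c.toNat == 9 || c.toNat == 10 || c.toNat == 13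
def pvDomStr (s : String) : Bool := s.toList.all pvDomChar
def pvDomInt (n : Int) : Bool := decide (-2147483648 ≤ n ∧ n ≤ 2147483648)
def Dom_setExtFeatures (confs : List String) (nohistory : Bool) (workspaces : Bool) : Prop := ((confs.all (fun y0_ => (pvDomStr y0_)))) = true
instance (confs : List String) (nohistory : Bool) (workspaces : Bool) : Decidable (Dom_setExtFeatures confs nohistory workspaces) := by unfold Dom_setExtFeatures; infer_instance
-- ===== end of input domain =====

-- B replaces A's interleaved match-and-mutate loop (popping keys from the dict) by an index table built
-- in a read-only first pass, then a second pass over the prefs that overwrites or appends (alternative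
-- decomposition, same cost). Both Pythons mutate `confs` in place identically; the theorem is about the
-- returned list, which is also the full mutation.

-- shared string helpers: 'user_pref("' + k + '", ' and the full pref line (both Pythons build these)
def pvPrefix (k : String) : String := "user_pref(\"" ++ k ++ "\", "
def pvLine (k v : String) : String := "user_pref(\"" ++ k ++ "\", " ++ v ++ ");"

-- the dict literal + the two flag-conditional assignments (identical in A and B)
def dSet : List (String × String) → String → String → List (String × String)
  | [], k, v => [(k, v)]
  | (k', v') :: rest, k, v => if k' = k then (k, v) :: rest else (k', v') :: dSet rest k v

def pvValues (nohistory : Bool) (workspaces : Bool) : List (String × String) :=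
  let v0 := [("privacy.clearOnShutdown.history", "false"), ("browser.startup.page", "1"),
             ("floorp.browser.workspaces.enabled", "false")]
  let v1 := if nohistory = true then dSet v0 "privacy.clearOnShutdown.history" "true" else v0
  if workspaces = true then
    dSet (dSet v1 "browser.startup.page" "3") "floorp.browser.workspaces.enabled" "true"
  else v1

-- ===== PORT A =====
-- dict.pop(k)
def dPop : List (String × String) → String → List (String × String)
  | [], _ => []
  | (k', v') :: rest, k => if k' = k then rest else (k', v') :: dPop rest k

-- inner 'for ii in valuestoadd: if line.startswith(...)' — first matching key (with its value)
def findKeyA (line : String) : List (String × String) → Option (String × String)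
  | [] => none
  | (k, v) :: rest =>
      if PySem.Str.startswith line (pvPrefix k) then some (k, v) else findKeyA line rest

-- 'for i, line in enumerate(confs)': i carried explicitly; confs[i] = …, then pop + break
def loopA : Nat → List String → List String → List (String × String) →
    List String × List (String × String)
  | _, [], cs, d => (cs, d)
  | i, line :: rest, cs, d =>
      match findKeyA line d with
      | some (k, v) => loopA (i + 1) rest (cs.set i (pvLine k v)) (dPop d k)
      | none => loopA (i + 1) rest cs d

def setExtFeatures (confs : List String) (nohistory : Bool) (workspaces : Bool) : List String :=
  let st := loopA 0 confs confs (pvValues nohistory workspaces)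
  -- 'for i in valuestoadd: confs.append(...)'
  st.1 ++ st.2.map (fun p => pvLine p.1 p.2)

-- ===== PORT B =====
-- inner loop of pass 1: first key not yet in `found` whose prefix matches the line
def findKeyB (line : String) (found : List (String × Nat)) : List (String × String) → Option (String × String)
  | [] => none
  | (k, v) :: rest =>
      if !(found.any (fun p => p.1 == k)) && PySem.Str.startswith line (pvPrefix k) then some (k, v)
      else findKeyB line found rest

-- pass 1: found[key] = i for the first matching line of each key
def pass1 : Nat → List String → List (String × String) → List (String × Nat) → List (String × Nat)
  | _, [], _, found => found
  | i, line :: rest, vta, found =>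
      match findKeyB line found vta with
      | some (k, _) => pass1 (i + 1) rest vta (found ++ [(k, i)])
      | none => pass1 (i + 1) rest vta found

-- found[key] (first match in the association list)
def flookup : List (String × Nat) → String → Option Nat
  | [], _ => none
  | (k', i) :: rest, k => if k' = k then some i else flookup rest k

-- pass 2: overwrite the indexed line or append
def pass2 : List (String × String) → List (String × Nat) → List String → List String
  | [], _, cs => cs
  | (k, v) :: rest, found, cs =>
      match flookup found k with
      | some i => pass2 rest found (cs.set i (pvLine k v))
      | none => pass2 rest found (cs ++ [pvLine k v])

def setExtFeatures_alt (confs : List String) (nohistory : Bool) (workspaces : Bool) : List String :=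
  let vta := pvValues nohistory workspaces
  pass2 vta (pass1 0 confs vta []) confs

-- ===== PRECONDITION & SPEC =====
def Spec_setExtFeatures (confs : List String) (nohistory : Bool) (workspaces : Bool) (out : List String) : Prop := out = setExtFeatures_alt confs nohistory workspaces
instance (confs : List String) (nohistory : Bool) (workspaces : Bool) (out : List String) : Decidable (Spec_setExtFeatures confs nohistory workspaces out) := by unfold Spec_setExtFeatures; infer_instance

-- ===== CLAIM (what is proved, stated in full; the proofs are below) =====
def Claim_equal_setExtFeatures : Prop := ∀ (confs : List String) (nohistory : Bool) (workspaces : Bool), Dom_setExtFeatures confs nohistory workspaces → Spec_setExtFeatures confs nohistory workspaces (setExtFeatures confs nohistory workspaces)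

-- ===== LEMMAS AND PROOFS =====

-- proof-only: the sets of pass 2 without the appends
def setPass : List (String × String) → List (String × Nat) → List String → List String
  | [], _, cs => cs
  | (k, v) :: rest, found, cs =>
      match flookup found k with
      | some i => setPass rest found (cs.set i (pvLine k v))
      | none => setPass rest found cs

-- proof-only: the part of V whose keys are not in found
def filterNot (V : List (String × String)) (found : List (String × Nat)) : List (String × String) :=
  V.filter (fun p => !(found.any (fun q => q.1 == p.1)))

-- unfold lemmas for the match-based definitions
theorem setPass_cons_some {k v : String} {rest : List (String × String)} {f : List (String × Nat)}
    {cs : List String} {i : Nat} (h : flookup f k = some i) :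
    setPass ((k, v) :: rest) f cs = setPass rest f (cs.set i (pvLine k v)) := by
  conv_lhs => unfold setPass
  rw [h]

theorem setPass_cons_none {k v : String} {rest : List (String × String)} {f : List (String × Nat)}
    {cs : List String} (h : flookup f k = none) :
    setPass ((k, v) :: rest) f cs = setPass rest f cs := by
  conv_lhs => unfold setPass
  rw [h]

theorem pass2_cons_some {k v : String} {rest : List (String × String)} {f : List (String × Nat)}
    {cs : List String} {i : Nat} (h : flookup f k = some i) :
    pass2 ((k, v) :: rest) f cs = pass2 rest f (cs.set i (pvLine k v)) := by
  conv_lhs => unfold pass2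
  rw [h]

theorem pass2_cons_none {k v : String} {rest : List (String × String)} {f : List (String × Nat)}
    {cs : List String} (h : flookup f k = none) :
    pass2 ((k, v) :: rest) f cs = pass2 rest f (cs ++ [pvLine k v]) := by
  conv_lhs => unfold pass2
  rw [h]

theorem loopA_cons_some {n : Nat} {line : String} {rest cs : List String}
    {d : List (String × String)} {k v : String} (h : findKeyA line d = some (k, v)) :
    loopA n (line :: rest) cs d = loopA (n + 1) rest (cs.set n (pvLine k v)) (dPop d k) := by
  conv_lhs => unfold loopA
  rw [h]

theorem loopA_cons_none {n : Nat} {line : String} {rest cs : List String}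
    {d : List (String × String)} (h : findKeyA line d = none) :
    loopA n (line :: rest) cs d = loopA (n + 1) rest cs d := by
  conv_lhs => unfold loopA
  rw [h]

theorem pass1_cons_some {n : Nat} {line : String} {rest : List String}
    {vta : List (String × String)} {f : List (String × Nat)} {k v : String}
    (h : findKeyB line f vta = some (k, v)) :
    pass1 n (line :: rest) vta f = pass1 (n + 1) rest vta (f ++ [(k, n)]) := by
  conv_lhs => unfold pass1
  rw [h]

theorem pass1_cons_none {n : Nat} {line : String} {rest : List String}
    {vta : List (String × String)} {f : List (String × Nat)}
    (h : findKeyB line f vta = none) :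
    pass1 n (line :: rest) vta f = pass1 (n + 1) rest vta f := by
  conv_lhs => unfold pass1
  rw [h]

-- elementary facts about flookup
theorem flookup_eq_none_iff (f : List (String × Nat)) (k : String) :
    flookup f k = none ↔ (f.any (fun q => q.1 == k)) = false := by
  induction f with
  | nil => simp [flookup]
  | cons p rest ih =>
    obtain ⟨k', i⟩ := p
    by_cases h : k' = k <;> simp [flookup, h, ih]

theorem flookup_append_single (f : List (String × Nat)) (k k' : String) (i : Nat)
    (hk : flookup f k = none) :
    flookup (f ++ [(k, i)]) k' = if k' = k then some i else flookup f k' := by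
  induction f with
  | nil =>
    by_cases h : k' = k
    · subst h; simp [flookup]
    · have h' : ¬ k = k' := fun hh => h (Eq.symm hh)
      simp [flookup, h, h']
  | cons p rest ih =>
    obtain ⟨k₀, j⟩ := p
    simp only [flookup] at hk
    by_cases h : k₀ = k
    · rw [if_pos h] at hk; cases hk
    · rw [if_neg h] at hk
      by_cases h0 : k₀ = k'
      · have hne : ¬ k' = k := fun hh => h (h0.trans hh)
        simp only [List.cons_append, flookup, if_pos h0, if_neg hne]
      · simp only [List.cons_append, flookup, if_neg h0]
        exact ih hk

theorem mem_of_flookup_some (f : List (String × Nat)) (k : String) (i : Nat)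
    (h : flookup f k = some i) : (k, i) ∈ f := by
  induction f with
  | nil => simp [flookup] at h
  | cons p rest ih =>
    obtain ⟨k', j⟩ := p
    simp only [flookup] at h
    by_cases hk : k' = k
    · rw [if_pos hk] at h
      injection h with h
      subst hk; subst h
      exact List.mem_cons_self ..
    · rw [if_neg hk] at h
      exact List.mem_cons_of_mem _ (ih h)

-- findKeyA on the not-yet-found part of V is findKeyB on V with the found guard
theorem findA_eq_findB (line : String) (f : List (String × Nat)) (V : List (String × String)) :
    findKeyA line (filterNot V f) = findKeyB line f V := by
  induction V with
  | nil => simp [filterNot, findKeyA, findKeyB]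
  | cons p rest ih =>
    obtain ⟨k, v⟩ := p
    cases hc : (f.any (fun q => q.1 == k)) with
    | true =>
      have hdrop : filterNot ((k, v) :: rest) f = filterNot rest f := by
        simp [filterNot, hc]
      rw [hdrop, ih]
      simp [findKeyB, hc]
    | false =>
      have hkeep : filterNot ((k, v) :: rest) f = (k, v) :: filterNot rest f := by
        simp [filterNot, hc]
      rw [hkeep]
      have hguard : (!(f.any (fun p => p.1 == k)) && PySem.Str.startswith line (pvPrefix k))
          = PySem.Str.startswith line (pvPrefix k) := by
        rw [hc, Bool.not_false, Bool.true_and]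
      unfold findKeyA findKeyB
      rw [hguard]
      cases hs : PySem.Str.startswith line (pvPrefix k) with
      | true => rfl
      | false =>
        rw [if_neg (by simp), if_neg (by simp)]
        exact ih

theorem findKeyB_mem (line : String) (f : List (String × Nat)) (V : List (String × String))
    (k : String) (v : String) (h : findKeyB line f V = some (k, v)) :
    (k, v) ∈ V ∧ (f.any (fun q => q.1 == k)) = false := by
  induction V with
  | nil => simp [findKeyB] at h
  | cons p rest ih =>
    obtain ⟨k', v'⟩ := p
    simp only [findKeyB] at h
    by_cases hg : (!(f.any (fun p => p.1 == k')) && PySem.Str.startswith line (pvPrefix k')) = true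
    · rw [if_pos hg] at h
      injection h with h
      injection h with h1 h2
      subst h1; subst h2
      refine ⟨List.mem_cons_self .., ?_⟩
      rw [Bool.and_eq_true] at hg
      have hg1 := hg.1
      rw [Bool.not_eq_true'] at hg1
      exact hg1
    · rw [if_neg hg] at h
      obtain ⟨h1, h2⟩ := ih h
      exact ⟨List.mem_cons_of_mem _ h1, h2⟩

-- popping the found key = filtering with the extended found table (keys of V distinct)
theorem dPop_filterNot (V : List (String × String)) (f : List (String × Nat)) (k : String) (i : Nat)
    (hnd : (V.map Prod.fst).Nodup) :
    dPop (filterNot V f) k = filterNot V (f ++ [(k, i)]) := by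
  induction V with
  | nil => simp [filterNot, dPop]
  | cons p rest ih =>
    obtain ⟨k', v'⟩ := p
    simp only [List.map_cons, List.nodup_cons] at hnd
    cases hc : (f.any (fun q => q.1 == k')) with
    | true =>
      have h1 : filterNot ((k', v') :: rest) f = filterNot rest f := by
        simp [filterNot, hc]
      have h2 : filterNot ((k', v') :: rest) (f ++ [(k, i)]) = filterNot rest (f ++ [(k, i)]) := by
        simp [filterNot, List.any_append, hc]
      rw [h1, h2, ih hnd.2]
    | false =>
      by_cases he : k' = k
      · subst he
        have h1 : filterNot ((k', v') :: rest) f = (k', v') :: filterNot rest f := by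
          simp [filterNot, hc]
        have h2 : filterNot ((k', v') :: rest) (f ++ [(k', i)]) = filterNot rest (f ++ [(k', i)]) := by
          simp [filterNot, List.any_append, hc]
        rw [h1, h2]
        simp only [dPop, if_pos rfl]
        unfold filterNot
        apply List.filter_congr
        intro p hp
        have hpk : ¬ p.1 = k' := fun hh => hnd.1 (hh ▸ List.mem_map_of_mem (f := Prod.fst) hp)
        have hpk' : ¬ k' = p.1 := fun hh => hpk (Eq.symm hh)
        simp [List.any_append, hpk']
      · have he' : ¬ k = k' := fun hh => he (Eq.symm hh)
        have h1 : filterNot ((k', v') :: rest) f = (k', v') :: filterNot rest f := by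
          simp [filterNot, hc]
        have h2 : filterNot ((k', v') :: rest) (f ++ [(k, i)]) = (k', v') :: filterNot rest (f ++ [(k, i)]) := by
          simp [filterNot, List.any_append, hc, he']
        rw [h1, h2]
        simp only [dPop, if_neg he]
        rw [ih hnd.2]

-- set commutes with append / another set at a different index
theorem set_append_of_lt {α : Type} (x : α) : ∀ (xs : List α) (ys : List α) (i : Nat),
    i < xs.length → (xs ++ ys).set i x = xs.set i x ++ ys
  | [], _, i, h => absurd h (by simp)
  | a :: l, ys, 0, _ => rfl
  | a :: l, ys, Nat.succ n, h => by
      have : ((a :: l) ++ ys).set (n + 1) x = a :: ((l ++ ys).set n x) := rfl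
      rw [this, set_append_of_lt x l ys n (by simpa using h)]
      rfl

theorem set_set_comm {α : Type} (x y : α) : ∀ (xs : List α) (i j : Nat), ¬ i = j →
    (xs.set i x).set j y = (xs.set j y).set i x
  | [], _, _, _ => rfl
  | a :: l, 0, 0, h => absurd rfl h
  | a :: l, 0, Nat.succ m, _ => rfl
  | a :: l, Nat.succ n, 0, _ => rfl
  | a :: l, Nat.succ n, Nat.succ m, h => by
      have hnm : ¬ n = m := fun hh => h (by rw [hh])
      show a :: (l.set n x).set m y = a :: (l.set m y).set n x
      rw [set_set_comm x y l n m hnm]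

-- setPass ignores an appended tail when all indices are in range
theorem setPass_append (f : List (String × Nat)) (ys : List String) :
    ∀ (V : List (String × String)) (cs : List String),
    (∀ p ∈ f, p.2 < cs.length) → setPass V f (cs ++ ys) = setPass V f cs ++ ys := by
  intro V
  induction V with
  | nil => intro cs _; rfl
  | cons p rest ih =>
    intro cs hf
    obtain ⟨k, v⟩ := p
    cases h : flookup f k with
    | none => rw [setPass_cons_none h, setPass_cons_none h]; exact ih cs hf
    | some i =>
      have hi : i < cs.length := hf _ (mem_of_flookup_some f k i h)
      rw [setPass_cons_some h, setPass_cons_some h,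
        set_append_of_lt (pvLine k v) cs ys i hi]
      exact ih _ (fun p hp => by rw [List.length_set]; exact hf p hp)

-- a set at an index not used by found commutes through setPass
theorem setPass_set_comm (f : List (String × Nat)) (n : Nat) (x : String)
    (hn : ∀ p ∈ f, ¬ p.2 = n) :
    ∀ (V : List (String × String)) (cs : List String),
    setPass V f (cs.set n x) = (setPass V f cs).set n x := by
  intro V
  induction V with
  | nil => intro cs; rfl
  | cons p rest ih =>
    intro cs
    obtain ⟨k, v⟩ := p
    cases h : flookup f k with
    | none => rw [setPass_cons_none h, setPass_cons_none h]; exact ih cs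
    | some i =>
      have hi : ¬ i = n := hn _ (mem_of_flookup_some f k i h)
      rw [setPass_cons_some h, setPass_cons_some h,
        set_set_comm x (pvLine k v) cs n i (fun hh => hi (Eq.symm hh))]
      exact ih _

-- extending found by k changes nothing on a segment without key k
theorem setPass_congr_guard (f : List (String × Nat)) (k : String) (n : Nat)
    (hfk : flookup f k = none) :
    ∀ (W : List (String × String)), (∀ p ∈ W, ¬ p.1 = k) →
    ∀ (cs : List String), setPass W (f ++ [(k, n)]) cs = setPass W f cs := by
  intro W
  induction W with
  | nil => intro _ cs; rfl
  | cons p rest ih =>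
    intro hW cs
    obtain ⟨k', v'⟩ := p
    have hne : ¬ k' = k := hW (k', v') (List.mem_cons_self ..)
    have hlk : flookup (f ++ [(k, n)]) k' = flookup f k' := by
      rw [flookup_append_single f k k' n hfk, if_neg hne]
    have hW' : ∀ p ∈ rest, ¬ p.1 = k := fun p hp => hW p (List.mem_cons_of_mem _ hp)
    cases h : flookup f k' with
    | none =>
      rw [setPass_cons_none (hlk.trans h), setPass_cons_none h]
      exact ih hW' cs
    | some i =>
      rw [setPass_cons_some (hlk.trans h), setPass_cons_some h]
      exact ih hW' _

-- extending found by a fresh key k (present in V, keys distinct) = doing k's set first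
theorem setPass_extend (f : List (String × Nat)) (k v : String) (n : Nat)
    (hfk : flookup f k = none) (hn : ∀ p ∈ f, ¬ p.2 = n) :
    ∀ (V : List (String × String)), (k, v) ∈ V → (V.map Prod.fst).Nodup →
    ∀ (cs : List String), setPass V (f ++ [(k, n)]) cs = setPass V f (cs.set n (pvLine k v)) := by
  intro V
  induction V with
  | nil => intro hmem _ _; cases hmem
  | cons p rest ih =>
    intro hmem hnd cs
    obtain ⟨k', v'⟩ := p
    simp only [List.map_cons, List.nodup_cons] at hnd
    by_cases he : k' = k
    · subst he
      have hv : v' = v := by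
        rcases List.mem_cons.1 hmem with h | h
        · exact (congrArg Prod.snd h).symm
        · exact absurd (List.mem_map_of_mem (f := Prod.fst) h) (by simpa using hnd.1)
      subst hv
      have hlk : flookup (f ++ [(k', n)]) k' = some n := by
        rw [flookup_append_single f k' k' n hfk, if_pos rfl]
      rw [setPass_cons_some hlk, setPass_cons_none hfk]
      exact setPass_congr_guard f k' n hfk rest
        (fun p hp hpk => hnd.1 (hpk ▸ List.mem_map_of_mem (f := Prod.fst) hp)) _
    · have hmem' : (k, v) ∈ rest := by
        rcases List.mem_cons.1 hmem with h | h
        · exact absurd (congrArg Prod.fst h).symm he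
        · exact h
      have hlk : flookup (f ++ [(k, n)]) k' = flookup f k' := by
        rw [flookup_append_single f k k' n hfk, if_neg he]
      cases h : flookup f k' with
      | none =>
        rw [setPass_cons_none (hlk.trans h), setPass_cons_none h]
        exact ih hmem' hnd.2 cs
      | some i =>
        have hi : ¬ i = n := hn _ (mem_of_flookup_some f k' i h)
        rw [setPass_cons_some (hlk.trans h), setPass_cons_some h,
          set_set_comm (pvLine k v) (pvLine k' v') cs n i (fun hh => hi (Eq.symm hh))]
        exact ih hmem' hnd.2 _

-- pass 2 = the sets, then the lines of the not-found keys appended in order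
theorem pass2_eq (f : List (String × Nat)) :
    ∀ (V : List (String × String)) (cs : List String),
    (∀ p ∈ f, p.2 < cs.length) →
    pass2 V f cs = setPass V f cs ++ (filterNot V f).map (fun p => pvLine p.1 p.2) := by
  intro V
  induction V with
  | nil => intro cs _; simp [pass2, setPass, filterNot]
  | cons p rest ih =>
    intro cs hf
    obtain ⟨k, v⟩ := p
    cases h : flookup f k with
    | some i =>
      have hc : (f.any (fun q => q.1 == k)) = true := by
        cases hany : (f.any (fun q => q.1 == k)) with
        | true => rfl
        | false =>
          have := (flookup_eq_none_iff f k).2 hany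
          rw [h] at this; cases this
      have hdrop : filterNot ((k, v) :: rest) f = filterNot rest f := by
        simp [filterNot, hc]
      rw [pass2_cons_some h, setPass_cons_some h, hdrop]
      exact ih _ (fun p hp => by rw [List.length_set]; exact hf p hp)
    | none =>
      have hc : (f.any (fun q => q.1 == k)) = false := (flookup_eq_none_iff f k).1 h
      have hkeep : filterNot ((k, v) :: rest) f = (k, v) :: filterNot rest f := by
        simp [filterNot, hc]
      rw [pass2_cons_none h, setPass_cons_none h, hkeep,
        ih (cs ++ [pvLine k v]) (fun p hp => by
          rw [List.length_append]
          exact Nat.lt_of_lt_of_le (hf p hp) (Nat.le_add_right _ _)),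
        setPass_append f [pvLine k v] rest cs hf]
      simp

-- main invariant: A's fused loop from state (sets-applied, keys-filtered) equals B's two passes
theorem main_inv (V : List (String × String)) (hnd : (V.map Prod.fst).Nodup)
    (cs₀ : List String) :
    ∀ (tail : List String) (n : Nat) (f : List (String × Nat)),
    (∀ p ∈ f, p.2 < n) → n + tail.length = cs₀.length →
    (loopA n tail (setPass V f cs₀) (filterNot V f)).1 ++
      (loopA n tail (setPass V f cs₀) (filterNot V f)).2.map (fun p => pvLine p.1 p.2)
      = pass2 V (pass1 n tail V f) cs₀ := by
  intro tail
  induction tail with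
  | nil =>
    intro n f hf hlen
    simp only [loopA, pass1]
    rw [pass2_eq f V cs₀ (fun p hp => by
      have h1 := hf p hp
      simp only [List.length_nil, Nat.add_zero] at hlen
      omega)]
  | cons line rest ih =>
    intro n f hf hlen
    have hlen' : n + 1 + rest.length = cs₀.length := by
      simp only [List.length_cons] at hlen; omega
    cases h : findKeyB line f V with
    | none =>
      have hA : findKeyA line (filterNot V f) = none := by
        rw [findA_eq_findB line f V]; exact h
      rw [loopA_cons_none hA, pass1_cons_none h]
      exact ih (n + 1) f (fun p hp => Nat.lt_succ_of_lt (hf p hp)) hlen'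
    | some kv =>
      obtain ⟨k, v⟩ := kv
      have hA : findKeyA line (filterNot V f) = some (k, v) := by
        rw [findA_eq_findB line f V]; exact h
      obtain ⟨hmem, hnot⟩ := findKeyB_mem line f V k v h
      have hfk : flookup f k = none := (flookup_eq_none_iff f k).2 hnot
      have hn : ∀ p ∈ f, ¬ p.2 = n := fun p hp => Nat.ne_of_lt (hf p hp)
      have e1 : (setPass V f cs₀).set n (pvLine k v) = setPass V (f ++ [(k, n)]) cs₀ := by
        rw [← setPass_set_comm f n (pvLine k v) hn V cs₀,
          ← setPass_extend f k v n hfk hn V hmem hnd cs₀]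
      rw [loopA_cons_some hA, pass1_cons_some h, e1, dPop_filterNot V f k n hnd]
      exact ih (n + 1) (f ++ [(k, n)])
        (fun p hp => by
          rcases List.mem_append.1 hp with hp | hp
          · exact Nat.lt_succ_of_lt (hf p hp)
          · rw [List.mem_singleton] at hp
            rw [hp]
            exact Nat.lt_succ_self n)
        hlen'

theorem setPass_nil_found : ∀ (V : List (String × String)) (cs : List String),
    setPass V [] cs = cs := by
  intro V
  induction V with
  | nil => intro cs; rfl
  | cons p rest ih =>
    intro cs
    obtain ⟨k, v⟩ := p
    rw [setPass_cons_none rfl]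
    exact ih cs

theorem filterNot_nil_found (V : List (String × String)) : filterNot V [] = V := by
  simp [filterNot]

theorem pvValues_nodup (nohistory workspaces : Bool) :
    ((pvValues nohistory workspaces).map Prod.fst).Nodup := by
  cases nohistory <;> cases workspaces <;> decide

-- ===== VERDICT (by name: the statement is the Claim_ definition above) =====
theorem setExtFeatures_spec : Claim_equal_setExtFeatures := by
  intro confs nohistory workspaces _
  show setExtFeatures confs nohistory workspaces = setExtFeatures_alt confs nohistory workspaces
  have h := main_inv (pvValues nohistory workspaces) (pvValues_nodup nohistory workspaces)
    confs confs 0 [] (fun p hp => by cases hp) (by simp)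
  rw [setPass_nil_found, filterNot_nil_found] at h
  exact h
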